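-- pv_equiv track=rewrite | github.com/Martinien-dot/MartinienCPTemplates | codeforces012/R481/E.py | solve
-- ===== SOURCE A (Python) =====
-- def solve(w, a):
--     b = 0
--     maxA = 0
--     minA = 0
--     for c in a:
--         b+=c
--         maxA = max(b, maxA)
--         minA = min(b, minA)
--     if maxA>w:
--         return 0
--     lf = -minA if minA<0 else minA
--     rg = w-maxA if maxA>0 else w
--     if lf>rg:
--         return 0
--     return rg-lf+1
-- ===== SOURCE B (Python) =====
-- def solve(w, a):
--     # Divide and conquer: each segment is summarized by (total, best max prefix
--     # including empty, best min prefix including empty); summaries merge like a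
--     # segment tree, so the prefix extremes are never tracked by a left-to-right scan.
--     def agg(xs):
--         if len(xs) == 1:
--             c = xs[0]
--             return (c, max(c, 0), min(c, 0))
--         mid = len(xs) // 2
--         sl, xl, nl = agg(xs[:mid])
--         sr, xr, nr = agg(xs[mid:])
--         return (sl + sr, max(xl, sl + xr), min(nl, sl + nr))
--     if a:
--         _, maxA, minA = agg(a)
--     else:
--         maxA = minA = 0
--     return max(0, (w - maxA) - (-minA) + 1)
-- ===== Notes on version B (the rewrite author's own statement) =====
-- stated objective: alternative
-- what changed: B replaces A's single left-to-right scan tracking running sum and running prefix extremes by a divide-and-conquer segment aggregation (sum, max prefix, min prefix merged segment-tree style) and a single closed-form answer max(0, (w-maxA)+minA+1) instead of A's guard-and-branch tail.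
import Mathlib
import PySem

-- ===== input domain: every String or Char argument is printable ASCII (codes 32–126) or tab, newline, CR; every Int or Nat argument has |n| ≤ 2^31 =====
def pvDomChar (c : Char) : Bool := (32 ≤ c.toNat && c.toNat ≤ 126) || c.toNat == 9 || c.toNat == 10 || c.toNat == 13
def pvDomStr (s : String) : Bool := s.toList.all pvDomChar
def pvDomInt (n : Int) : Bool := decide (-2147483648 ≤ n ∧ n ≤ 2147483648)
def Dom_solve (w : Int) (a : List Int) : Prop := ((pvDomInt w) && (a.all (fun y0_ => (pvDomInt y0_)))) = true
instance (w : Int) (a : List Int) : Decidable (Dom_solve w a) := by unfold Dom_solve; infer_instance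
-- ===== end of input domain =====

-- B replaces A's running-sum/extrema scan by a divide-and-conquer segment aggregation
-- (sum, max prefix, min prefix merged segment-tree style) plus one closed-form answer.

-- ===== PORT A =====
def solve (w : Int) (a : List Int) : Int :=
  let st := a.foldl
    (fun (t : Int × Int × Int) c =>
      let b := t.1 + c
      (b, max b t.2.1, min b t.2.2)) (0, 0, 0)
  let maxA := st.2.1
  let minA := st.2.2
  if maxA > w then 0
  else
    let lf := if minA < 0 then -minA else minA
    let rg := if maxA > 0 then w - maxA else w
    if lf > rg then 0 else rg - lf + 1

-- ===== PORT B =====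
/-- segment summary (total, max prefix sum incl. empty, min prefix sum incl. empty);
the `[]` branch only makes the recursion total — B's Python never calls `agg` on `[]`. -/
def agg (xs : List Int) : Int × Int × Int :=
  if xs.length ≤ 1 then
    match xs with
    | [] => (0, 0, 0)
    | c :: _ => (c, max c 0, min c 0)
  else
    let mid := xs.length / 2
    let L := agg (xs.take mid)
    let R := agg (xs.drop mid)
    (L.1 + R.1, max L.2.1 (L.1 + R.2.1), min L.2.2 (L.1 + R.2.2))
termination_by xs.length
decreasing_by
  · simp only [List.length_take]; omega
  · simp only [List.length_drop]; omega

def solve_alt (w : Int) (a : List Int) : Int :=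
  let p : Int × Int :=
    if a.isEmpty then (0, 0)
    else
      let t := agg a
      (t.2.1, t.2.2)
  let maxA := p.1
  let minA := p.2
  max 0 ((w - maxA) - (-minA) + 1)

-- ===== PRECONDITION & SPEC =====
def Spec_solve (w : Int) (a : List Int) (out : Int) : Prop := out = solve_alt w a
instance (w : Int) (a : List Int) (out : Int) : Decidable (Spec_solve w a out) := by unfold Spec_solve; infer_instance

-- ===== CLAIM (what is proved, stated in full; the proofs are below) =====
def Claim_equal_solve : Prop := ∀ (w : Int) (a : List Int), Dom_solve w a → Spec_solve w a (solve w a)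

-- ===== LEMMAS AND PROOFS =====

/-- A's loop step. -/
def pvStep (t : Int × Int × Int) (c : Int) : Int × Int × Int :=
  let b := t.1 + c
  (b, max b t.2.1, min b t.2.2)

lemma solve_eq (w : Int) (a : List Int) :
    solve w a =
      (let st := a.foldl pvStep (0, 0, 0)
       if st.2.1 > w then 0
       else
         let lf := if st.2.2 < 0 then -st.2.2 else st.2.2
         let rg := if st.2.1 > 0 then w - st.2.1 else w
         if lf > rg then 0 else rg - lf + 1) := rfl

lemma agg_leaf (c : Int) : agg [c] = (c, max c 0, min c 0) := by
  rw [agg.eq_def]; simp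

lemma agg_unfold (xs : List Int) (h : 2 ≤ xs.length) :
    agg xs =
      ((agg (xs.take (xs.length / 2))).1 + (agg (xs.drop (xs.length / 2))).1,
       max (agg (xs.take (xs.length / 2))).2.1
         ((agg (xs.take (xs.length / 2))).1 + (agg (xs.drop (xs.length / 2))).2.1),
       min (agg (xs.take (xs.length / 2))).2.2
         ((agg (xs.take (xs.length / 2))).1 + (agg (xs.drop (xs.length / 2))).2.2)) := by
  rw [agg.eq_def, if_neg (by omega)]

/-- `agg` computes a sound segment summary, and folding A's step over the segment from any
state `(b, mx, mn)` with `mn ≤ b ≤ mx` is described by that summary. -/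
lemma agg_spec : ∀ (n : Nat) (xs : List Int), xs.length = n → xs ≠ [] →
    (agg xs).2.2 ≤ 0 ∧ 0 ≤ (agg xs).2.1 ∧ (agg xs).2.2 ≤ (agg xs).1 ∧ (agg xs).1 ≤ (agg xs).2.1 ∧
    ∀ b mx mn : Int, mn ≤ b → b ≤ mx →
      xs.foldl pvStep (b, mx, mn)
        = (b + (agg xs).1, max mx (b + (agg xs).2.1), min mn (b + (agg xs).2.2)) := by
  intro n
  induction n using Nat.strong_induction_on with
  | _ n ih =>
    intro xs hlen hne
    match xs, hne with
    | [c], _ =>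
      rw [agg_leaf]
      refine ⟨by simp, by simp, by simp, by simp, ?_⟩
      intro b mx mn h1 h2
      simp only [List.foldl, pvStep]
      refine Prod.ext rfl (Prod.ext ?_ ?_) <;> simp <;> omega
    | c₁ :: c₂ :: t, _ =>
      have hlen2 : 2 ≤ (c₁ :: c₂ :: t).length := by simp
      rw [agg_unfold _ hlen2]
      have hL : ((c₁ :: c₂ :: t).take ((c₁ :: c₂ :: t).length / 2)).length
          = (c₁ :: c₂ :: t).length / 2 := by rw [List.length_take]; omega
      have hR : ((c₁ :: c₂ :: t).drop ((c₁ :: c₂ :: t).length / 2)).length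
          = (c₁ :: c₂ :: t).length - (c₁ :: c₂ :: t).length / 2 := by rw [List.length_drop]
      have hLne : (c₁ :: c₂ :: t).take ((c₁ :: c₂ :: t).length / 2) ≠ [] := by
        intro h; rw [← List.length_eq_zero_iff] at h; omega
      have hRne : (c₁ :: c₂ :: t).drop ((c₁ :: c₂ :: t).length / 2) ≠ [] := by
        intro h; rw [← List.length_eq_zero_iff] at h; omega
      obtain ⟨l1, l2, l3, l4, lfold⟩ :=
        ih ((c₁ :: c₂ :: t).take ((c₁ :: c₂ :: t).length / 2)).length (by omega) _ rfl hLne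
      obtain ⟨r1, r2, r3, r4, rfold⟩ :=
        ih ((c₁ :: c₂ :: t).drop ((c₁ :: c₂ :: t).length / 2)).length (by omega) _ rfl hRne
      refine ⟨by dsimp only; omega, by dsimp only; omega, by dsimp only; omega,
        by dsimp only; omega, ?_⟩
      intro b mx mn h1 h2
      conv_lhs => rw [← List.take_append_drop ((c₁ :: c₂ :: t).length / 2) (c₁ :: c₂ :: t)]
      rw [List.foldl_append, lfold b mx mn h1 h2,
          rfold _ _ _ (by omega) (by omega)]
      refine Prod.ext (by dsimp only; ring) (Prod.ext ?_ ?_) <;> dsimp only <;> omega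

-- ===== VERDICT (by name: the statement is the Claim_ definition above) =====
theorem solve_spec : Claim_equal_solve := by
  intro w a _
  unfold Spec_solve
  rw [solve_eq]
  cases a with
  | nil => simp [solve_alt]; omega
  | cons c t =>
    obtain ⟨h1, h2, h3, h4, hfold⟩ := agg_spec (c :: t).length (c :: t) rfl (by simp)
    rw [hfold 0 0 0 le_rfl le_rfl]
    simp only [solve_alt, List.isEmpty_cons, Bool.false_eq_true, if_false, zero_add]
    rw [max_eq_right h2, min_eq_right h1]
    split_ifs <;> omega
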